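-- pv_equiv track=rewrite | github.com/mohammad-mallaee/CS | Algorithms/Homeworks/2/python/2.py | coin_values_table
-- ===== SOURCE A (Python) =====
-- def coin_values_table(A: list):
--     D = [[0] * len(A) for i in range(len(A))]
--     for i in range(len(A) - 1, -1, -1):
--         for j in range(len(A)):
--             if i > j:
--                 D[i][j] = 0
--             elif i == j:
--                 D[i][j] = A[i]
--             else:
--                 s = sum(A[i : j + 1])
--                 D[i][j] = s - min(D[i + 1][j], D[i][j - 1])
--     return D
-- ===== SOURCE B (Python) =====
-- def coin_values_table(A: list):
--     n = len(A)
--     P = [0]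
--     for x in A:
--         P.append(P[-1] + x)
--     rows = []
--     prev = []
--     for i in range(n - 1, -1, -1):
--         row = [0] * i + [A[i]]
--         for j in range(i + 1, n):
--             row.append(P[j + 1] - P[i] - min(prev[j], row[j - 1]))
--         rows.append(row)
--         prev = row
--     rows.reverse()
--     return rows
-- ===== Notes on version B (the rewrite author's own statement) =====
-- stated objective: faster
-- what changed: B precomputes a prefix-sum array so each range sum is O(1) instead of re-summing A[i:j+1], and builds each DP row from the previous row instead of mutating a pre-allocated n×n grid with an O(n) slice sum per cell.
import Mathlib
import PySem

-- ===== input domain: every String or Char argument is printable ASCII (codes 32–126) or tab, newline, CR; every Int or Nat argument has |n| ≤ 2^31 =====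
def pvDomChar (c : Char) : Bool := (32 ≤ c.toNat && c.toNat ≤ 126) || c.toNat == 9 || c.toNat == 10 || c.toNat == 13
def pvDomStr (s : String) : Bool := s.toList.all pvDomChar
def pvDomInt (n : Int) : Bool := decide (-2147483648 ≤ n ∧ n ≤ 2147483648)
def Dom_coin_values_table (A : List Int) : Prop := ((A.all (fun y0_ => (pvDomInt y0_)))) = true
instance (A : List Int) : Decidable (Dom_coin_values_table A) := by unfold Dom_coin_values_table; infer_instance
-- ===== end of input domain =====

-- B replaces A's O(n) inner `sum(A[i:j+1])` by O(1) prefix-sum differences and builds each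
-- row left-to-right from the previous row instead of mutating a full pre-allocated grid
-- (objective: faster, O(n^3) → O(n^2)).

-- ===== PORT A =====
-- D[i][j] read: exact Python indexing (pyGetD; every read A performs is in range, so the default is never used)
def pvIdx2 (D : List (List Int)) (i j : Int) : Int :=
  PySem.List.pyGetD (PySem.List.pyGetD D i []) j 0

-- D[i][j] = v: exact for the nonnegative in-range indices A assigns (Python raises out of range; A never does)
def pvSet2 (D : List (List Int)) (i j : Int) (v : Int) : List (List Int) :=
  D.set i.toNat ((D.getD i.toNat []).set j.toNat v)

def coin_values_table (A : List Int) : List (List Int) :=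
  let n : Int := A.length
  let D0 := (PySem.List.pyRange 0 n 1).map (fun _ => List.replicate A.length (0 : Int))
  (PySem.List.pyRange (n - 1) (-1) (-1)).foldl (fun D i =>
    (PySem.List.pyRange 0 n 1).foldl (fun D j =>
      if i > j then pvSet2 D i j 0
      else if i = j then pvSet2 D i j (PySem.List.pyGetD A i 0)
      else
        pvSet2 D i j ((PySem.List.slice A (some i) (some (j + 1))).sum -
          min (pvIdx2 D (i + 1) j) (pvIdx2 D i (j - 1)))) D) D0

-- ===== PORT B =====
def coin_values_table_alt (A : List Int) : List (List Int) :=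
  let n : Int := A.length
  let P := A.foldl (fun P x => P ++ [PySem.List.pyGetD P (-1) 0 + x]) [0]
  let st := (PySem.List.pyRange (n - 1) (-1) (-1)).foldl
    (fun (st : List (List Int) × List Int) i =>
      let row := (PySem.List.pyRange (i + 1) n 1).foldl (fun row j =>
        row ++ [PySem.List.pyGetD P (j + 1) 0 - PySem.List.pyGetD P i 0 -
                 min (PySem.List.pyGetD st.2 j 0) (PySem.List.pyGetD row (j - 1) 0)])
        (List.replicate i.toNat (0 : Int) ++ [PySem.List.pyGetD A i 0])
      (st.1 ++ [row], row)) ([], [])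
  st.1.reverse

-- ===== PRECONDITION & SPEC =====
def Spec_coin_values_table (A : List Int) (out : List (List Int)) : Prop := out = coin_values_table_alt A
instance (A : List Int) (out : List (List Int)) : Decidable (Spec_coin_values_table A out) := by unfold Spec_coin_values_table; infer_instance

-- ===== CLAIM (what is proved, stated in full; the proofs are below) =====
def Claim_equal_coin_values_table : Prop := ∀ (A : List Int), Dom_coin_values_table A → Spec_coin_values_table A (coin_values_table A)

-- ===== LEMMAS AND PROOFS =====

-- the DP value both programs compute at cell (i, j)
def pvF (A : List Int) : Nat → Nat → Int
  | i, j =>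
    if j < i then 0
    else if i = j then A.getD i 0
    else ((A.drop i).take (j + 1 - i)).sum - min (pvF A (i + 1) j) (pvF A i (j - 1))
  termination_by i j => j - i
  decreasing_by all_goals omega

lemma pvF_lt (A : List Int) {i j : Nat} (h : j < i) : pvF A i j = 0 := by
  rw [pvF]; simp [h]

lemma pvF_diag (A : List Int) (i : Nat) : pvF A i i = A.getD i 0 := by
  rw [pvF]; simp

lemma pvF_gt (A : List Int) {i j : Nat} (h : i < j) :
    pvF A i j = ((A.drop i).take (j + 1 - i)).sum - min (pvF A (i + 1) j) (pvF A i (j - 1)) := by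
  rw [pvF]; rw [if_neg (by omega), if_neg (by omega)]

-- the n×n table whose entry (r, c) is g r c
def pvTbl (n : Nat) (g : Nat → Nat → Int) : List (List Int) :=
  (List.range n).map (fun r => (List.range n).map (g r))

lemma pvTbl_congr {n : Nat} {g g' : Nat → Nat → Int}
    (h : ∀ r, r < n → ∀ c, c < n → g r c = g' r c) : pvTbl n g = pvTbl n g' := by
  unfold pvTbl
  refine List.map_congr_left (fun r hr => List.map_congr_left (fun c hc => ?_))
  exact h r (List.mem_range.mp hr) c (List.mem_range.mp hc)

lemma pvIdx2_tbl {n : Nat} (g : Nat → Nat → Int) {r c : Nat} (hr : r < n) (hc : c < n) :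
    pvIdx2 (pvTbl n g) (r : Int) (c : Int) = g r c := by
  unfold pvIdx2 pvTbl
  rw [PySem.List.pyGetD_natCast, PySem.List.pyGetD_natCast,
      PySem.List.getD_map_range _ _ _ _ hr, PySem.List.getD_map_range _ _ _ _ hc]

lemma pvSet2_tbl {n : Nat} (g : Nat → Nat → Int) {i j : Nat} (hi : i < n) (_hj : j < n) (v : Int) :
    pvSet2 (pvTbl n g) (i : Int) (j : Int) v
      = pvTbl n (fun r c => if r = i ∧ c = j then v else g r c) := by
  unfold pvSet2 pvTbl
  rw [Int.toNat_natCast, Int.toNat_natCast, PySem.List.getD_map_range _ _ _ _ hi]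
  apply List.ext_getElem
  · simp
  · intro r h1 h2
    simp only [List.getElem_set, List.getElem_map, List.getElem_range] at *
    simp only [List.length_set, List.length_map, List.length_range] at h1
    by_cases hri : i = r
    · subst hri
      rw [if_pos rfl]
      apply List.ext_getElem
      · simp
      · intro c hc1 hc2
        simp only [List.getElem_set, List.getElem_map, List.getElem_range]
        by_cases hcj : j = c
        · subst hcj; simp
        · rw [if_neg hcj, if_neg (by tauto)]
    · rw [if_neg hri]
      refine List.map_congr_left (fun c _ => ?_)
      rw [if_neg (by tauto)]

-- entries already written by A when it is about to write cell (i, m)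
def pvGI (A : List Int) (i m : Nat) : Nat → Nat → Int := fun r c =>
  if r < i then 0 else if r = i then (if c < m then pvF A i c else 0) else pvF A r c

lemma pvInnerA (A : List Int) (i : Nat) (hi : i < A.length) (m : Nat) (hm : m ≤ A.length) :
    (PySem.List.pyRange 0 (m : Int) 1).foldl (fun D j =>
      if (i : Int) > j then pvSet2 D i j 0
      else if (i : Int) = j then pvSet2 D i j (PySem.List.pyGetD A i 0)
      else
        pvSet2 D i j ((PySem.List.slice A (some (i : Int)) (some (j + 1))).sum -
          min (pvIdx2 D ((i : Int) + 1) j) (pvIdx2 D i (j - 1))))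
      (pvTbl A.length (pvGI A i 0))
    = pvTbl A.length (pvGI A i m) := by
  induction m with
  | zero =>
    rw [show ((0 : Nat) : Int) = 0 from rfl, PySem.List.pyRange_one_eq_nil le_rfl]
    rfl
  | succ m ih =>
    have hm' : m ≤ A.length := Nat.le_of_succ_le hm
    have hcast : ((m + 1 : Nat) : Int) = (m : Int) + 1 := by push_cast; ring
    rw [hcast, PySem.List.pyRange_one_succ_right (by positivity), List.foldl_append,
      ih hm', List.foldl_cons, List.foldl_nil]
    have upd : ∀ v : Int, v = pvF A i m →
        pvTbl A.length (fun r c => if r = i ∧ c = m then v else pvGI A i m r c)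
        = pvTbl A.length (pvGI A i (m + 1)) := by
      intro v hv
      apply pvTbl_congr
      intro r _ c _
      by_cases hrc : r = i ∧ c = m
      · obtain ⟨rfl, rfl⟩ := hrc
        simp [pvGI, hv]
      · rw [if_neg hrc]
        unfold pvGI
        by_cases hlt : r < i
        · simp [hlt]
        · by_cases hr : r = i
          · subst hr
            have hc : c ≠ m := fun h => hrc ⟨rfl, h⟩
            have hcc : (c < m) = (c < m + 1) := by
              apply propext; constructor <;> intro <;> omega
            simp [hcc]
          · simp [hlt, hr]
    rcases Nat.lt_trichotomy m i with h1 | h1 | h1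
    · rw [if_pos (by exact_mod_cast h1 : ((m : Int) < (i : Int))), pvSet2_tbl _ hi (by omega)]
      exact upd 0 (pvF_lt A h1).symm
    · subst h1
      rw [if_neg (by omega), if_pos rfl, pvSet2_tbl _ hi (by omega)]
      refine upd _ ?_
      rw [PySem.List.pyGetD_natCast, pvF_diag]
    · rw [if_neg (by exact_mod_cast Nat.not_lt.mpr h1.le),
        if_neg (by exact_mod_cast Nat.ne_of_lt h1), pvSet2_tbl _ hi (by omega)]
      refine upd _ ?_
      have e1 : ((i : Int) + 1) = ((i + 1 : Nat) : Int) := by push_cast; ring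
      have e2 : ((m : Int) - 1) = ((m - 1 : Nat) : Int) := by omega
      rw [e1, e2, pvIdx2_tbl _ (by omega) (by omega), pvIdx2_tbl _ hi (by omega)]
      rw [PySem.List.slice_toNat A (by omega) (by omega)]
      simp only [Int.toNat_natCast]
      have e3 : ((m : Int) + 1).toNat = m + 1 := by omega
      rw [e3]
      have g1 : pvGI A i m (i + 1) m = pvF A (i + 1) m := by
        unfold pvGI; rw [if_neg (by omega), if_neg (by omega)]
      have g2 : pvGI A i m i (m - 1) = pvF A i (m - 1) := by
        unfold pvGI; rw [if_neg (by omega), if_pos rfl, if_pos (by omega)]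
      rw [g1, g2, ← pvF_gt A h1]

lemma pvOuterA (A : List Int) (t : Nat) (ht : t ≤ A.length) :
    (PySem.List.pyRange ((t : Int) - 1) (-1) (-1)).foldl (fun D i =>
      (PySem.List.pyRange 0 (A.length : Int) 1).foldl (fun D j =>
        if i > j then pvSet2 D i j 0
        else if i = j then pvSet2 D i j (PySem.List.pyGetD A i 0)
        else
          pvSet2 D i j ((PySem.List.slice A (some i) (some (j + 1))).sum -
            min (pvIdx2 D (i + 1) j) (pvIdx2 D i (j - 1)))) D)
      (pvTbl A.length (fun r c => if r < t then 0 else pvF A r c))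
    = pvTbl A.length (pvF A) := by
  induction t with
  | zero =>
    rw [show ((0 : Nat) : Int) - 1 = -1 from by norm_num, PySem.List.pyRange_neg_one_eq_nil le_rfl]
    simp only [List.foldl_nil]
    exact pvTbl_congr (fun r _ c _ => by simp)
  | succ t ih =>
    have ht' : t ≤ A.length := Nat.le_of_succ_le ht
    have hcast : ((t + 1 : Nat) : Int) - 1 = (t : Int) := by push_cast; ring
    rw [hcast, PySem.List.pyRange_neg_one_cons (by omega)]
    simp only [List.foldl_cons]
    have hinit : pvTbl A.length (fun r c => if r < t + 1 then 0 else pvF A r c)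
        = pvTbl A.length (pvGI A t 0) := by
      apply pvTbl_congr
      intro r _ c _
      unfold pvGI
      by_cases h1 : r < t
      · rw [if_pos (by omega), if_pos h1]
      · by_cases h2 : r = t
        · subst h2; rw [if_pos (by omega), if_neg (by omega), if_pos rfl, if_neg (by omega)]
        · rw [if_neg (by omega), if_neg h1, if_neg h2]
    rw [hinit, pvInnerA A t (by omega) A.length le_rfl]
    have hfin : pvTbl A.length (pvGI A t A.length)
        = pvTbl A.length (fun r c => if r < t then 0 else pvF A r c) := by
      apply pvTbl_congr
      intro r _ c hc
      unfold pvGI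
      by_cases h1 : r < t
      · rw [if_pos h1, if_pos h1]
      · by_cases h2 : r = t
        · subst h2; rw [if_neg (by omega), if_pos rfl, if_pos hc, if_neg (by omega)]
        · rw [if_neg h1, if_neg h2, if_neg h1]
    rw [hfin]
    exact ih ht'

lemma pvA_eq (A : List Int) : coin_values_table A = pvTbl A.length (pvF A) := by
  unfold coin_values_table
  have hD0 : (PySem.List.pyRange 0 (A.length : Int) 1).map
      (fun _ => List.replicate A.length (0 : Int))
      = pvTbl A.length (fun r c => if r < A.length then 0 else pvF A r c) := by
    rw [PySem.List.pyRange_zero_nat, List.map_map]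
    unfold pvTbl
    refine List.map_congr_left (fun r hr => ?_)
    have hrn : r < A.length := List.mem_range.mp hr
    have : (List.range A.length).map (fun c => if r < A.length then 0 else pvF A r c)
        = (List.range A.length).map (fun _ => (0 : Int)) := by
      refine List.map_congr_left (fun c _ => by rw [if_pos hrn])
    rw [this]
    simp [List.map_const']
  simp only []
  rw [hD0]
  exact pvOuterA A A.length le_rfl

-- ----- B side -----

lemma pvGetD_neg_one (xs : List Int) (d : Int) (h : xs ≠ []) :
    PySem.List.pyGetD xs (-1) d = xs.getD (xs.length - 1) d := by
  have hn : 1 ≤ xs.length := List.length_pos_iff.mpr h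
  simp only [PySem.List.pyGetD, PySem.List.pyGet?, PySem.List.pyIdx?,
    List.getD_eq_getElem?_getD]
  have h1 : ¬ (0 : Int) ≤ -1 := by omega
  have h2 : -(xs.length : Int) ≤ -1 := by omega
  rw [if_neg h1, if_pos h2]
  norm_num

lemma pvPrefix_eq (A : List Int) :
    A.foldl (fun P x => P ++ [PySem.List.pyGetD P (-1) 0 + x]) [0]
      = (List.range (A.length + 1)).map (fun k => (A.take k).sum) := by
  induction A using List.reverseRecOn with
  | nil => simp [List.range_succ]
  | append_singleton as x ih =>
    rw [List.foldl_append, List.foldl_cons, List.foldl_nil, ih]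
    have hne : (List.range (as.length + 1)).map (fun k => (as.take k).sum) ≠ [] := by simp
    rw [pvGetD_neg_one _ _ hne]
    have hlen : ((List.range (as.length + 1)).map (fun k => (as.take k).sum)).length - 1
        = as.length := by simp
    rw [hlen, PySem.List.getD_map_range _ _ _ _ (by omega), List.take_length]
    have hlen2 : (as ++ [x]).length = as.length + 1 := by simp
    rw [hlen2]
    conv_rhs => rw [List.range_succ, List.map_append]
    congr 1
    · refine List.map_congr_left (fun k hk => ?_)
      have : k ≤ as.length := by
        have := List.mem_range.mp hk; omega
      rw [List.take_append_of_le_length this]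
    · simp

lemma pvInnerB (A P prev : List Int) (i : Nat) (hi : i < A.length)
    (hP : ∀ k, k ≤ A.length → PySem.List.pyGetD P (k : Int) 0 = (A.take k).sum)
    (hprev : ∀ j, i < j → j < A.length → PySem.List.pyGetD prev (j : Int) 0 = pvF A (i + 1) j)
    (m : Nat) (him : i + 1 ≤ m) (hm : m ≤ A.length) :
    (PySem.List.pyRange ((i : Int) + 1) (m : Int) 1).foldl (fun row j =>
        row ++ [PySem.List.pyGetD P (j + 1) 0 - PySem.List.pyGetD P (i : Int) 0 -
                 min (PySem.List.pyGetD prev j 0) (PySem.List.pyGetD row (j - 1) 0)])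
      (List.replicate i (0 : Int) ++ [PySem.List.pyGetD A (i : Int) 0])
    = (List.range m).map (fun c => if c < i then 0 else pvF A i c) := by
  induction m, him using Nat.le_induction with
  | base =>
    have hcast : ((i + 1 : Nat) : Int) = (i : Int) + 1 := by push_cast; ring
    rw [hcast, PySem.List.pyRange_one_eq_nil le_rfl, List.foldl_nil, List.range_succ,
      List.map_append]
    congr 1
    · have : (List.range i).map (fun c => if c < i then 0 else pvF A i c)
          = (List.range i).map (fun _ => (0 : Int)) := by
        refine List.map_congr_left (fun c hc => by rw [if_pos (List.mem_range.mp hc)])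
      rw [this]
      simp [List.map_const']
    · rw [PySem.List.pyGetD_natCast]
      simp [pvF_diag]
  | succ m hm1 ih =>
    have hm' : m ≤ A.length := Nat.le_of_succ_le hm
    have hcast : ((m + 1 : Nat) : Int) = (m : Int) + 1 := by push_cast; ring
    rw [hcast, PySem.List.pyRange_one_succ_right (by omega), List.foldl_append,
      ih hm', List.foldl_cons, List.foldl_nil]
    have r1 : ((m : Int) + 1) = ((m + 1 : Nat) : Int) := by push_cast; ring
    have r2 : ((m : Int) - 1) = ((m - 1 : Nat) : Int) := by omega
    rw [r1, hP (m + 1) hm, hP i (by omega), hprev m (by omega) (by omega), r2,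
      PySem.List.pyGetD_natCast, PySem.List.getD_map_range _ _ _ _ (by omega)]
    rw [if_neg (by omega)]
    have hsum : (A.take (m + 1)).sum - (A.take i).sum = ((A.drop i).take (m + 1 - i)).sum := by
      have : A.take (i + (m + 1 - i)) = A.take i ++ (A.drop i).take (m + 1 - i) :=
        List.take_add
      rw [show i + (m + 1 - i) = m + 1 from by omega] at this
      rw [this, List.sum_append]
      ring
    rw [hsum, ← pvF_gt A (by omega : i < m), List.range_succ, List.map_append]
    congr 1
    simp [if_neg (by omega : ¬ m < i)]

lemma pvOuterB (A P : List Int)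
    (hP : ∀ k, k ≤ A.length → PySem.List.pyGetD P (k : Int) 0 = (A.take k).sum)
    (t : Nat) (ht : t ≤ A.length) (prev : List Int)
    (hprev : ∀ j, t ≤ j → j < A.length → PySem.List.pyGetD prev (j : Int) 0 = pvF A t j) :
    ((PySem.List.pyRange ((t : Int) - 1) (-1) (-1)).foldl
      (fun (st : List (List Int) × List Int) i =>
        (st.1 ++ [(PySem.List.pyRange (i + 1) (A.length : Int) 1).foldl (fun row j =>
            row ++ [PySem.List.pyGetD P (j + 1) 0 - PySem.List.pyGetD P i 0 -
                     min (PySem.List.pyGetD st.2 j 0) (PySem.List.pyGetD row (j - 1) 0)])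
            (List.replicate i.toNat (0 : Int) ++ [PySem.List.pyGetD A i 0])],
         (PySem.List.pyRange (i + 1) (A.length : Int) 1).foldl (fun row j =>
            row ++ [PySem.List.pyGetD P (j + 1) 0 - PySem.List.pyGetD P i 0 -
                     min (PySem.List.pyGetD st.2 j 0) (PySem.List.pyGetD row (j - 1) 0)])
            (List.replicate i.toNat (0 : Int) ++ [PySem.List.pyGetD A i 0])))
      ((((List.range A.length).map (fun r => (List.range A.length).map (pvF A r))).drop t).reverse, prev)).1
    = ((List.range A.length).map (fun r => (List.range A.length).map (pvF A r))).reverse := by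
  induction t generalizing prev with
  | zero =>
    rw [show ((0 : Nat) : Int) - 1 = -1 from by norm_num,
      PySem.List.pyRange_neg_one_eq_nil le_rfl, List.foldl_nil]
    simp
  | succ t ih =>
    have ht' : t ≤ A.length := Nat.le_of_succ_le ht
    have hcast : ((t + 1 : Nat) : Int) - 1 = (t : Int) := by push_cast; ring
    rw [hcast, PySem.List.pyRange_neg_one_cons (by omega), List.foldl_cons]
    simp only [Int.toNat_natCast]
    have hrow : (PySem.List.pyRange ((t : Int) + 1) (A.length : Int) 1).foldl (fun row j =>
          row ++ [PySem.List.pyGetD P (j + 1) 0 - PySem.List.pyGetD P (t : Int) 0 -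
                   min (PySem.List.pyGetD prev j 0) (PySem.List.pyGetD row (j - 1) 0)])
        (List.replicate t (0 : Int) ++ [PySem.List.pyGetD A (t : Int) 0])
        = (List.range A.length).map (pvF A t) := by
      rw [pvInnerB A P prev t (by omega) hP
        (fun j hj1 hj2 => hprev j (by omega) hj2) A.length (by omega) le_rfl]
      refine List.map_congr_left (fun c _ => ?_)
      by_cases h : c < t
      · rw [if_pos h, pvF_lt A h]
      · rw [if_neg h]
    rw [hrow]
    have hRt : (((List.range A.length).map
          (fun r => (List.range A.length).map (pvF A r))).drop (t + 1)).reverse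
          ++ [(List.range A.length).map (pvF A t)]
        = (((List.range A.length).map
          (fun r => (List.range A.length).map (pvF A r))).drop t).reverse := by
      conv_rhs => rw [List.drop_eq_getElem_cons (by simpa using (by omega : t < A.length)),
        List.reverse_cons]
      congr 1
      simp
    rw [hRt]
    refine ih ht' _ (fun j hj1 hj2 => ?_)
    rw [PySem.List.pyGetD_natCast, PySem.List.getD_map_range _ _ _ _ hj2]

lemma pvB_eq (A : List Int) : coin_values_table_alt A = pvTbl A.length (pvF A) := by
  unfold coin_values_table_alt
  simp only []
  rw [pvPrefix_eq]
  have hP : ∀ k, k ≤ A.length →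
      PySem.List.pyGetD ((List.range (A.length + 1)).map (fun k => (A.take k).sum)) (k : Int) 0
        = (A.take k).sum := by
    intro k hk
    rw [PySem.List.pyGetD_natCast, PySem.List.getD_map_range _ _ _ _ (by omega)]
  have hmain := pvOuterB A _ hP A.length le_rfl []
    (fun j hj1 hj2 => absurd hj2 (by omega))
  rw [show List.drop A.length ((List.range A.length).map
      (fun r => (List.range A.length).map (pvF A r))) = [] from by simp,
    List.reverse_nil] at hmain
  rw [hmain, List.reverse_reverse]
  rfl

-- ===== VERDICT (by name: the statement is the Claim_ definition above) =====
theorem coin_values_table_spec : Claim_equal_coin_values_table := by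
  intro A _
  show coin_values_table A = coin_values_table_alt A
  rw [pvA_eq, pvB_eq]
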